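-- pv_equiv track=rewrite | github.com/joshanashakya/dissertation | workspace/dataset/java-python/GeeksForGeeks/1451/A/2.py | maxElement
-- ===== SOURCE A (Python) =====
-- def maxElement(a, n):
--
--     if n < 3:
--         return -1
--     maxElement = a[0]
--     maxProd = a[n - 1] * a[1]
--
--     for i in range(1, n):
--
--         # Calculate the product of the previous
--         # and the next element for
--         # the current element
--
--         currprod = a[i - 1] * a[(i + 1) % n]
--
--         if currprod > maxProd:
--             maxProd = currprod
--             maxElement = a[i]
--
--         # If current product is equal to the
--         # current maximum product then
--         # choose the maximum element
--         elif currprod == maxProd: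
--             maxElement = max(maxElement, a[i])
--     return maxElement
-- ===== SOURCE B (Python) =====
-- def maxElement(a, n):
--     # Sort-then-select: sort all (circular neighbor product, element) pairs
--     # ascending (Python tuple order = lexicographic) and take the last pair's
--     # element. The lexicographically largest pair has the maximal product and,
--     # among equal products, the largest element -- exactly A's tie-break.
--     if n < 3:
--         return -1
--     pairs = sorted((a[(i - 1) % n] * a[(i + 1) % n], a[i]) for i in range(n))
--     return pairs[-1][1]
-- ===== Notes on version B (the rewrite author's own statement) =====
-- stated objective: alternative
-- what changed: Replaces A's single-pass running-max loop with a sort-then-select algorithm: build the (circular neighbor product, element) pairs, sort them ascending, and return the element of the last (lexicographically largest) pair, which reproduces A's tie-break of taking the largest element among equal max products.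
import Mathlib
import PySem

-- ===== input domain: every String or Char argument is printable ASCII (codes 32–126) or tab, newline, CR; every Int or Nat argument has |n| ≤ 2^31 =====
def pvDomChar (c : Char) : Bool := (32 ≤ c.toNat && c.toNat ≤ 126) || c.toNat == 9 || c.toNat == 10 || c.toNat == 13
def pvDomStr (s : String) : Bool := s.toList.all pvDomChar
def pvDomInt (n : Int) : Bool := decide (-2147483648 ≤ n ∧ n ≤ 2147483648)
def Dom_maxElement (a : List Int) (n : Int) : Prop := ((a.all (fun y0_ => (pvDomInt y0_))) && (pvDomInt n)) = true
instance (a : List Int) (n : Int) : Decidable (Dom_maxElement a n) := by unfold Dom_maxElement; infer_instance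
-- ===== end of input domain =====

-- B replaces A's one-pass running-max loop by sort-then-select over (product, element) pairs (alternative algorithm, not faster).

-- ===== PORT A =====
-- literal transliteration of A: running (maxElement, maxProd) state over range(1, n)
def maxElement (a : List Int) (n : Int) : Int :=
  if n < 3 then -1
  else
    ((PySem.List.pyRange 1 n 1).foldl (fun (st : Int × Int) (i : Int) =>
        let currprod := PySem.List.pyGetD a (i - 1) 0 * PySem.List.pyGetD a (PySem.Int.mod (i + 1) n) 0
        if currprod > st.2 then (PySem.List.pyGetD a i 0, currprod)
        else if currprod = st.2 then (max st.1 (PySem.List.pyGetD a i 0), st.2)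
        else st)
      (PySem.List.pyGetD a 0 0, PySem.List.pyGetD a (n - 1) 0 * PySem.List.pyGetD a 1 0)).1

-- ===== PORT B =====
-- Source B: sorted((a[(i-1)%n]*a[(i+1)%n], a[i]) for i in range(n)); Python's tuple
-- '<' is the lexicographic order, i.e. '<' on Lex (Int × Int) via toLex
def maxElement_alt (a : List Int) (n : Int) : Int :=
  if n < 3 then -1
  else
    let pairs := PySem.List.sorted
      ((PySem.List.pyRange 0 n 1).map (fun i =>
        (PySem.List.pyGetD a (PySem.Int.mod (i - 1) n) 0 * PySem.List.pyGetD a (PySem.Int.mod (i + 1) n) 0,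
         PySem.List.pyGetD a i 0)))
      (fun p => toLex p) false
    -- pairs[-1][1]; pairs is nonempty since 3 ≤ n
    (PySem.List.pyGetD pairs (-1) (0, 0)).2

-- ===== PRECONDITION & SPEC =====
-- A raises IndexError when 3 ≤ n and n > len(a); exactly those inputs are excluded.
def Pre_maxElement (a : List Int) (n : Int) : Prop := n < 3 ∨ n ≤ (a.length : Int)
instance (a : List Int) (n : Int) : Decidable (Pre_maxElement a n) := by unfold Pre_maxElement; infer_instance
def pvWitness_maxElement : List Int × Int := ([2, 5, -1, 7], 4)

def Spec_maxElement (a : List Int) (n : Int) (out : Int) : Prop := out = maxElement_alt a n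
instance (a : List Int) (n : Int) (out : Int) : Decidable (Spec_maxElement a n out) := by unfold Spec_maxElement; infer_instance

-- ===== CLAIM (what is proved, stated in full; the proofs are below) =====
def Claim_equal_maxElement : Prop := ∀ (a : List Int) (n : Int), Dom_maxElement a n → Pre_maxElement a n → Spec_maxElement a n (maxElement a n)

-- ===== LEMMAS AND PROOFS =====

-- the binary lexicographic-max step A's branches compute (proof-side abstraction)
def pyTupMax (p q : Int × Int) : Int × Int :=
  if p.1 < q.1 ∨ (p.1 = q.1 ∧ p.2 < q.2) then q else p

-- the pair (product, element) at index i, the common value both ports traverse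
def pvKey (a : List Int) (n i : Int) : Int × Int :=
  (PySem.List.pyGetD a (PySem.Int.mod (i - 1) n) 0 * PySem.List.pyGetD a (PySem.Int.mod (i + 1) n) 0,
   PySem.List.pyGetD a i 0)

-- A's branch structure on one step is the lexicographic-max step on the swapped pair
lemma tup_step (cp el e P : Int) :
    (if cp > P then (el, cp) else if cp = P then (max e el, P) else (e, P))
    = (pyTupMax (P, e) (cp, el)).swap := by
  unfold pyTupMax
  split_ifs <;> simp_all [Int.max_def] <;> omega

-- A's loop step equals pyTupMax on the swapped state (the un-modded index i-1 is in range)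
lemma stepA_eq_swap (a : List Int) (n i : Int) (st : Int × Int)
    (h1 : 1 ≤ i) (h2 : i < n) :
    (let currprod := PySem.List.pyGetD a (i - 1) 0 * PySem.List.pyGetD a (PySem.Int.mod (i + 1) n) 0
     if currprod > st.2 then (PySem.List.pyGetD a i 0, currprod)
     else if currprod = st.2 then (max st.1 (PySem.List.pyGetD a i 0), st.2)
     else st)
    = (pyTupMax st.swap (pvKey a n i)).swap := by
  have hmod : PySem.Int.mod (i - 1) n = i - 1 :=
    (PySem.Int.mod_eq_emod_of_pos (by omega)).trans (Int.emod_eq_of_lt (by omega) (by omega))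
  obtain ⟨e, P⟩ := st
  simpa only [pvKey, hmod] using
    tup_step (PySem.List.pyGetD a (i - 1) 0 * PySem.List.pyGetD a (PySem.Int.mod (i + 1) n) 0)
      (PySem.List.pyGetD a i 0) e P

-- folding a swapped step = swap of the plain fold
lemma foldl_swap_comm (l : List Int) (g : Int → Int × Int) (p : Int × Int) :
    l.foldl (fun st i => (pyTupMax st.swap (g i)).swap) p
      = (l.foldl (fun q i => pyTupMax q (g i)) p.swap).swap := by
  induction l generalizing p with
  | nil => simp
  | cons x t ih => simp [List.foldl_cons, ih]

-- pyTupMax is the max under the lexicographic order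
lemma pyTupMax_eq_lexMax (p q : Int × Int) :
    pyTupMax p q = if toLex p < toLex q then q else p := by
  unfold pyTupMax
  by_cases h : toLex p < toLex q
  · have hc : p.1 < q.1 ∨ (p.1 = q.1 ∧ p.2 < q.2) := Prod.Lex.lt_iff.mp h
    rw [if_pos hc, if_pos h]
  · have hc : ¬(p.1 < q.1 ∨ (p.1 = q.1 ∧ p.2 < q.2)) := fun hc => h (Prod.Lex.lt_iff.mpr hc)
    rw [if_neg hc, if_neg h]

lemma foldl_pyTupMax_mem (t : List (Int × Int)) (h : Int × Int) :
    t.foldl pyTupMax h ∈ h :: t := by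
  induction t generalizing h with
  | nil => simp
  | cons x t ih =>
    have := ih (pyTupMax h x)
    have hx : pyTupMax h x = h ∨ pyTupMax h x = x := by
      unfold pyTupMax; split_ifs <;> simp
    simp only [List.foldl_cons, List.mem_cons] at this ⊢
    rcases this with h1 | h1
    · rcases hx with h2 | h2 <;> rw [h1, h2] <;> simp
    · tauto

lemma le_foldl_pyTupMax (t : List (Int × Int)) (h : Int × Int) :
    ∀ y ∈ h :: t, toLex y ≤ toLex (t.foldl pyTupMax h) := by
  induction t generalizing h with
  | nil => simp
  | cons x t ih =>
    intro y hy
    simp only [List.mem_cons] at hy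
    have hmax : toLex h ≤ toLex (pyTupMax h x) ∧ toLex x ≤ toLex (pyTupMax h x) := by
      rw [pyTupMax_eq_lexMax]; split_ifs with hlt
      · exact ⟨le_of_lt hlt, le_refl _⟩
      · exact ⟨le_refl _, le_of_not_gt hlt⟩
    have hrec := ih (pyTupMax h x)
    have hself : toLex (pyTupMax h x) ≤ toLex (t.foldl pyTupMax (pyTupMax h x)) :=
      hrec _ (List.mem_cons_self)
    rcases hy with rfl | rfl | hy
    · exact le_trans hmax.1 hself
    · exact le_trans hmax.2 hself
    · exact hrec _ (List.mem_cons_of_mem _ hy)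

-- in a list pairwise-sorted by key, the last element has the maximal key
lemma key_getLast_sorted_ge {α κ : Type} [LinearOrder κ] (key : α → κ) :
    ∀ (s : List α) (hs : s ≠ []), s.Pairwise (fun a b => key a ≤ key b) →
      ∀ y ∈ s, key y ≤ key (s.getLast hs) := by
  intro s
  induction s with
  | nil => intro hs; exact absurd rfl hs
  | cons x t ih =>
    intro hs hp y hy
    cases t with
    | nil => simp at hy; subst hy; rfl
    | cons z u =>
      rw [List.getLast_cons (by simp)]
      rcases List.mem_cons.mp hy with rfl | hy'
      · exact le_trans (List.rel_of_pairwise_cons hp (List.getLast_mem _))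
          (le_refl _)
      · exact ih (by simp) (List.Pairwise.of_cons hp) y hy'

-- the last element of the sorted pair list IS the pyTupMax fold of the original list
lemma getLast_sorted_eq_fold (h : Int × Int) (t : List (Int × Int)) (hs : _ ≠ []) :
    (PySem.List.sorted (h :: t) (fun p => toLex p) false).getLast hs
      = t.foldl pyTupMax h := by
  set s := PySem.List.sorted (h :: t) (fun p => toLex p) false with hsdef
  have hperm : s.Perm (h :: t) := PySem.List.sorted_perm _ _ _
  have hpair : s.Pairwise (fun a b => toLex a ≤ toLex b) :=
    PySem.List.sorted_pairwise _ _
  have hlast_mem : s.getLast hs ∈ h :: t := hperm.mem_iff.mp (List.getLast_mem hs)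
  have hfold_mem : t.foldl pyTupMax h ∈ s := hperm.mem_iff.mpr (foldl_pyTupMax_mem t h)
  have h1 : toLex (s.getLast hs) ≤ toLex (t.foldl pyTupMax h) :=
    le_foldl_pyTupMax t h _ hlast_mem
  have h2 : toLex (t.foldl pyTupMax h) ≤ toLex (s.getLast hs) :=
    key_getLast_sorted_ge (fun p => toLex p) s hs hpair _ hfold_mem
  have := le_antisymm h2 h1
  exact (toLex.injective this.symm)

-- ===== VERDICT (by name: the statement is the Claim_ definition above) =====
theorem maxElement_spec : Claim_equal_maxElement := by
  intro a n _hdom hpre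
  unfold Spec_maxElement maxElement maxElement_alt
  by_cases hn3 : n < 3
  · simp [hn3]
  · have h3 : 3 ≤ n := by omega
    have hlen : n ≤ (a.length : Int) := by
      rcases hpre with h | h
      · omega
      · exact h
    simp only [hn3, if_false]
    have hcons : PySem.List.pyRange 0 n 1 = 0 :: PySem.List.pyRange 1 n 1 := by
      simpa using PySem.List.pyRange_one_cons (by omega : (0:Int) < n)
    -- A side: replace the step by the swapped pyTupMax step, then commute the swap out
    have hA : (PySem.List.pyRange 1 n 1).foldl (fun (st : Int × Int) (i : Int) =>
        let currprod := PySem.List.pyGetD a (i - 1) 0 * PySem.List.pyGetD a (PySem.Int.mod (i + 1) n) 0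
        if currprod > st.2 then (PySem.List.pyGetD a i 0, currprod)
        else if currprod = st.2 then (max st.1 (PySem.List.pyGetD a i 0), st.2)
        else st)
        (PySem.List.pyGetD a 0 0, PySem.List.pyGetD a (n - 1) 0 * PySem.List.pyGetD a 1 0)
      = ((PySem.List.pyRange 1 n 1).foldl (fun q i => pyTupMax q (pvKey a n i))
          (pvKey a n 0)).swap := by
      rw [PySem.List.foldl_congr_mem _ _ (fun st i => (pyTupMax st.swap (pvKey a n i)).swap) _
        (fun acc i hi => by
          have hm := PySem.List.mem_pyRange_one.mp hi
          exact stepA_eq_swap a n i acc hm.1 hm.2)]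
      rw [foldl_swap_comm]
      congr 1
      -- the initial states agree: (a[0], a[n-1]*a[1]).swap = pvKey a n 0
      have hm1 : PySem.Int.mod (-1 : Int) n = n - 1 := by
        rw [PySem.Int.mod_eq_emod_of_pos (by omega)]
        conv_lhs => rw [show (-1 : Int) = (n - 1) + n * (-1) by ring]
        rw [Int.add_mul_emod_self_left]
        exact Int.emod_eq_of_lt (by omega) (by omega)
      have hm2 : PySem.Int.mod (1 : Int) n = 1 := by
        rw [PySem.Int.mod_eq_emod_of_pos (by omega)]
        exact Int.emod_eq_of_lt (by omega) (by omega)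
      simp [pvKey, hm1, hm2]
    rw [hA]
    -- B side: the mapped pair list is pvKey over range(n); its sorted last is the fold
    have hmapeq : (PySem.List.pyRange 0 n 1).map (fun i =>
        (PySem.List.pyGetD a (PySem.Int.mod (i - 1) n) 0 * PySem.List.pyGetD a (PySem.Int.mod (i + 1) n) 0,
         PySem.List.pyGetD a i 0)) = pvKey a n 0 :: (PySem.List.pyRange 1 n 1).map (pvKey a n) := by
      rw [hcons, List.map_cons]; rfl
    rw [hmapeq]
    have hne : PySem.List.sorted (pvKey a n 0 :: (PySem.List.pyRange 1 n 1).map (pvKey a n))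
        (fun p => toLex p) false ≠ [] := by
      rw [Ne, PySem.List.sorted_eq_nil_iff]; simp
    rw [PySem.List.pyGetD_neg_one _ _ hne, getLast_sorted_eq_fold _ _ hne, List.foldl_map]
    simp
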